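-- pv_equiv track=rewrite | github.com/Aphtasik/Epita-S3-OCR | Python/ImageEtPretraitement.py | lineSlice
-- ===== SOURCE A (Python) =====
-- def horizontalProjection(M):
--     """
--     Cette fonction prend une matrice M et realise une projection horizontale des 1 sur la gauche
--     Elle sépare la matrice en sous matrice qui correspondent aux lignes
--     Ne pas utiliser si l'image/matrice n'a pas été traité
--     M : Matrice binarizé et traité
--     return : matrice correspondant au projeté horizontale de M
--     """
--     lM = len(M)
--     cM = len(M[0])
--
--     #Construction de la matrice projection à la bonne taille
--     listOfZero = [0 for i in range(cM)]
--     projectionM = []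
--     for i in range(lM):
--         L = listOfZero[:]
--         projectionM.append(L)
--
--     #projection horizontale
--     for i in range(lM):
--         indexOfOne = 0
--         for j in range(cM):
--             if M[i][j] == 1:
--                 projectionM[i][indexOfOne] = 1
--                 indexOfOne += 1
--
--     return projectionM
--
-- def lineSlice(M):
--     horizontalProjectedM = horizontalProjection(M)
--     matrixOfLines = []
--     matrixOfPxl = []
--
--     #si dans la projection on a un 0 a gauche, alors tout le reste de la liste est 0 -> interligne
--     for i in range(len(horizontalProjectedM)):
--         #si on a un 1 on commence a creer une matrice
--         if horizontalProjectedM[i][0] == 1: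
--             matrixOfPxl.append(M[i])
--         #si on a un 0, on a découpé notre ligne, on ajoute la matrice correspondant à une liste de matrice
--         #il faut quand meme prendre en compte le cas ou on a plusieurs lignes vide et ne pas ajouter de liste vide
--         elif horizontalProjectedM[i][0] == 0 and matrixOfPxl != []:
--             matrixOfLines.append(matrixOfPxl)
--             matrixOfPxl = []
--     #on ajoute la fin si la matrice de pxl n'est pas vide
--     if matrixOfPxl != []:
--         matrixOfLines.append(matrixOfPxl)
--
--     return matrixOfLines
-- ===== SOURCE B (Python) =====
-- def lineSlice(M):
--     cM = len(M[0])
--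
--     def black(row):
--         return any(row[j] == 1 for j in range(cM))
--
--     def span(rows):
--         # split off the leading run of black rows: (run, rest)
--         if rows and black(rows[0]):
--             run, rest = span(rows[1:])
--             return [rows[0]] + run, rest
--         return [], rows
--
--     def slices(rows):
--         if not rows:
--             return []
--         if black(rows[0]):
--             run, rest = span(rows)
--             return [run] + slices(rest)
--         return slices(rows[1:])
--
--     return slices(M)
-- ===== Notes on version B (the rewrite author's own statement) =====
-- stated objective: simpler
-- what changed: Replaced A's horizontal-projection matrix plus accumulate-and-flush state machine by a direct recursive run-partitioning: a bounded any() test per row and a span helper that splits off each leading run of non-empty rows.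
import Mathlib
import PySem

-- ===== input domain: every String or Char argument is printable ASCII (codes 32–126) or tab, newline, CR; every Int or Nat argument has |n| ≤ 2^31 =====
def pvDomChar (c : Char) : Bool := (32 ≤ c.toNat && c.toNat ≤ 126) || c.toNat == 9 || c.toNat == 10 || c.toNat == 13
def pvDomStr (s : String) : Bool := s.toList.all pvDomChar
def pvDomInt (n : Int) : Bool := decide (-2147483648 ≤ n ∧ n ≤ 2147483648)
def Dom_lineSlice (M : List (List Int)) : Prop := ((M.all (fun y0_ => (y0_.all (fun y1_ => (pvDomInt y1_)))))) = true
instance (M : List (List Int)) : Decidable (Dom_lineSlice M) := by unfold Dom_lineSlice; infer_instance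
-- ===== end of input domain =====

-- B replaces A's projection matrix + accumulate-and-flush state machine by a direct
-- recursive run-partitioning of the rows (objective: simpler; same asymptotic cost).

-- ===== PORT A =====
-- helper of A: horizontal projection (the in-place mutations of projectionM[i] become a
-- fold over the row state; the item assignments are in range wherever Python does not raise)
def horizontalProjection (M : List (List Int)) : List (List Int) :=
  let lM : Int := (M.length : Int)
  let cM : Int := ((PySem.List.pyGetD M 0 []).length : Int)
  let listOfZero : List Int := (PySem.List.pyRange 0 cM 1).map (fun _ => (0 : Int))
  let projectionM : List (List Int) :=
    (PySem.List.pyRange 0 lM 1).foldl (fun acc _ => acc ++ [listOfZero]) []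
  (PySem.List.pyRange 0 lM 1).foldl
    (fun proj i =>
      let st := (PySem.List.pyRange 0 cM 1).foldl
        (fun (st : List Int × Int) j =>
          if PySem.List.pyGetD (PySem.List.pyGetD M i []) j 0 == 1
          then (PySem.List.pySetD st.1 st.2 1, st.2 + 1) else st)
        (PySem.List.pyGetD proj i [], 0)
      PySem.List.pySetD proj i st.1)
    projectionM

def lineSlice (M : List (List Int)) : List (List (List Int)) :=
  let horizontalProjectedM := horizontalProjection M
  let st := (PySem.List.pyRange 0 (horizontalProjectedM.length : Int) 1).foldl
    (fun (st : List (List (List Int)) × List (List Int)) i =>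
      if PySem.List.pyGetD (PySem.List.pyGetD horizontalProjectedM i []) 0 0 == 1
      then (st.1, st.2 ++ [PySem.List.pyGetD M i []])
      else if PySem.List.pyGetD (PySem.List.pyGetD horizontalProjectedM i []) 0 0 == 0
              ∧ st.2 ≠ []
      then (st.1 ++ [st.2], [])
      else st)
    ([], [])
  if st.2 ≠ [] then st.1 ++ [st.2] else st.1

-- ===== PORT B =====
-- black(row): any(row[j] == 1 for j in range(cM))
def pvBlack (cM : Int) (row : List Int) : Bool :=
  (PySem.List.pyRange 0 cM 1).any (fun j => PySem.List.pyGetD row j 0 == 1)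

-- span(rows): split off the leading run of black rows
def pvSpan (p : List Int → Bool) : List (List Int) → List (List Int) × List (List Int)
  | [] => ([], [])
  | r :: rest =>
    if p r then
      let s := pvSpan p rest
      (r :: s.1, s.2)
    else ([], r :: rest)

-- termination fact for pvSlices (cited in its decreasing_by)
lemma pvSpan_snd_length_le (p : List Int → Bool) (rows : List (List Int)) :
    (pvSpan p rows).2.length ≤ rows.length := by
  induction rows with
  | nil => simp [pvSpan]
  | cons r rest ih =>
    by_cases h : p r <;> simp [pvSpan, h] <;> omega

-- slices(rows)
def pvSlices (p : List Int → Bool) : List (List Int) → List (List (List Int))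
  | [] => []
  | r :: rest =>
    if h : p r then
      (pvSpan p (r :: rest)).1 :: pvSlices p (pvSpan p (r :: rest)).2
    else pvSlices p rest
termination_by rows => rows.length
decreasing_by
  · simp only [pvSpan, h, if_true]
    exact Nat.lt_succ_of_le (pvSpan_snd_length_le p rest)
  · simp

def lineSlice_alt (M : List (List Int)) : List (List (List Int)) :=
  let cM : Int := ((PySem.List.pyGetD M 0 []).length : Int)
  pvSlices (pvBlack cM) M

-- ===== PRECONDITION & SPEC =====
-- Pre_ excludes exactly the inputs where the Python A raises IndexError: the empty matrix
-- (len(M[0])), a zero-width first row (projectionM[i][0]), and rows shorter than len(M[0])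
-- (M[i][j] for j in range(cM)).
def Pre_lineSlice (M : List (List Int)) : Prop :=
  M ≠ [] ∧ M.headD [] ≠ [] ∧ ∀ row ∈ M, (M.headD []).length ≤ row.length
instance (M : List (List Int)) : Decidable (Pre_lineSlice M) := by
  unfold Pre_lineSlice; infer_instance

def pvWitness_lineSlice : List (List Int) := [[1, 0], [0, 0], [1, 1], [0, 1]]

def Spec_lineSlice (M : List (List Int)) (out : List (List (List Int))) : Prop :=
  out = lineSlice_alt M
instance (M : List (List Int)) (out : List (List (List Int))) :
    Decidable (Spec_lineSlice M out) := by unfold Spec_lineSlice; infer_instance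

-- ===== CLAIM (what is proved, stated in full; the proofs are below) =====
def Claim_equal_lineSlice : Prop :=
  ∀ (M : List (List Int)), Dom_lineSlice M → Pre_lineSlice M →
    Spec_lineSlice M (lineSlice M)

-- ===== LEMMAS AND PROOFS =====

-- the inner fold of horizontalProjection, as a named function of the row
def pvInner (cM : Int) (row : List Int) (init : List Int) : List Int × Int :=
  (PySem.List.pyRange 0 cM 1).foldl
    (fun (st : List Int × Int) j =>
      if PySem.List.pyGetD row j 0 == 1
      then (PySem.List.pySetD st.1 st.2 1, st.2 + 1) else st)
    (init, 0)

-- A's state machine, on the rows themselves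
def pvStep (cM : Int) (st : List (List (List Int)) × List (List Int)) (row : List Int) :
    List (List (List Int)) × List (List Int) :=
  if pvBlack cM row then (st.1, st.2 ++ [row])
  else if st.2 ≠ [] then (st.1 ++ [st.2], []) else st

-- B's accumulator view of the state machine
def pvAux (p : List Int → Bool) (pxl : List (List Int)) :
    List (List Int) → List (List (List Int))
  | [] => if pxl = [] then [] else [pxl]
  | r :: rest =>
    if p r then pvAux p (pxl ++ [r]) rest
    else (if pxl = [] then [] else [pxl]) ++ pvAux p [] rest

lemma pv_map_constv {α β : Type} (l : List α) (v : β) :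
    (l.map fun _ => v) = List.replicate l.length v := by
  induction l with
  | nil => rfl
  | cons x xs ih => simp [ih, List.replicate_succ]

lemma pv_set_repl (c m : Nat) (h : c < m) :
    (List.replicate c (1:Int) ++ List.replicate (m - c) 0).set c 1
      = List.replicate (c+1) 1 ++ List.replicate (m - (c+1)) 0 := by
  have hmc : m - c = (m - (c+1)) + 1 := by omega
  rw [hmc]
  rw [show List.replicate ((m - (c+1)) + 1) (0:Int) = 0 :: List.replicate (m-(c+1)) 0 from rfl]
  rw [List.set_append_right _ _ (by simp)]
  rw [List.replicate_succ']
  simp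

lemma pv_inner_spec (row : List Int) (m : Nat) :
    ∀ k, k ≤ m → ∃ c, c ≤ k ∧
      ((PySem.List.pyRange 0 (k : Int) 1).foldl
        (fun (st : List Int × Int) j =>
          if PySem.List.pyGetD row j 0 == 1
          then (PySem.List.pySetD st.1 st.2 1, st.2 + 1) else st)
        (List.replicate m 0, 0))
        = (List.replicate c 1 ++ List.replicate (m - c) 0, (c : Int)) ∧
      (c = 0 ↔ ((PySem.List.pyRange 0 (k : Int) 1).any
          (fun j => PySem.List.pyGetD row j 0 == 1)) = false) := by
  intro k
  induction k with
  | zero =>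
    intro _
    refine ⟨0, le_refl _, ?_, by simp [PySem.List.pyRange_one_eq_nil]⟩
    simp [PySem.List.pyRange_one_eq_nil]
  | succ k ih =>
    intro hk
    obtain ⟨c, hck, hfold, hany⟩ := ih (by omega)
    have hsplit : PySem.List.pyRange 0 ((k+1 : Nat) : Int) 1
        = PySem.List.pyRange 0 (k : Int) 1 ++ [(k : Int)] := by
      push_cast
      exact PySem.List.pyRange_one_succ_right (by positivity)
    rw [hsplit, List.foldl_append, List.any_append, hfold]
    by_cases h1 : PySem.List.pyGetD row (k : Int) 0 = 1
    · refine ⟨c+1, by omega, ?_, ?_⟩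
      · simp only [List.foldl_cons, List.foldl_nil, h1, beq_self_eq_true, if_pos]
        have : PySem.List.pySetD (List.replicate c (1:Int) ++ List.replicate (m - c) 0) (c:Int) 1
            = List.replicate (c+1) 1 ++ List.replicate (m - (c+1)) 0 := by
          rw [PySem.List.pySetD_natCast]
          exact pv_set_repl c m (by omega)
        rw [this]
        refine Prod.ext rfl ?_
        push_cast; ring
      · simp [h1]
    · have hh : ¬ (row[k]?.getD 0 = 1) := by simpa using h1
      refine ⟨c, by omega, ?_, ?_⟩
      · simp only [List.foldl_cons, List.foldl_nil]
        rw [if_neg (by simpa using h1)]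
      · simp [hany, hh]

lemma pv_hp_head (row : List Int) (m : Nat) :
    PySem.List.pyGetD (pvInner (m : Int) row (List.replicate m 0)).1 0 0
      = if pvBlack (m : Int) row then 1 else 0 := by
  obtain ⟨c, _, hfold, hany⟩ := pv_inner_spec row m m (le_refl m)
  unfold pvInner pvBlack
  rw [hfold]
  cases c with
  | zero =>
    have : ((PySem.List.pyRange 0 (m:Int) 1).any
        (fun j => PySem.List.pyGetD row j 0 == 1)) = false := hany.mp rfl
    rw [this]
    simp [PySem.List.pyGetD_zero]
  | succ c =>
    have : ((PySem.List.pyRange 0 (m:Int) 1).any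
        (fun j => PySem.List.pyGetD row j 0 == 1)) = true := by
      by_contra h
      exact Nat.succ_ne_zero c (hany.mpr (by simpa using h))
    rw [this]
    simp [PySem.List.pyGetD_zero, List.replicate_succ]

lemma pv_proj_fold (M : List (List Int)) (w : Nat) :
    ∀ k, k ≤ M.length →
      ((PySem.List.pyRange 0 (k : Int) 1).foldl
        (fun proj i =>
          PySem.List.pySetD proj i
            (pvInner (w : Int) (PySem.List.pyGetD M i [])
              (PySem.List.pyGetD proj i [])).1)
        (List.replicate M.length (List.replicate w 0)))
      = (List.range k).map
          (fun (i : Nat) => (pvInner (w : Int) (PySem.List.pyGetD M (i : Int) [])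
            (List.replicate w 0)).1)
        ++ List.replicate (M.length - k) (List.replicate w 0) := by
  intro k
  induction k with
  | zero => intro _; simp [PySem.List.pyRange_one_eq_nil]
  | succ k ih =>
    intro hk
    have hsplit : PySem.List.pyRange 0 ((k+1 : Nat) : Int) 1
        = PySem.List.pyRange 0 (k : Int) 1 ++ [(k : Int)] := by
      push_cast
      exact PySem.List.pyRange_one_succ_right (by positivity)
    rw [hsplit, List.foldl_append, ih (by omega)]
    set A := (List.range k).map
      (fun (i : Nat) => (pvInner (w : Int) (PySem.List.pyGetD M (i : Int) [])
        (List.replicate w 0)).1) with hA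
    have hAlen : A.length = k := by simp [hA]
    have hget : PySem.List.pyGetD
        (A ++ List.replicate (M.length - k) (List.replicate w 0)) (k : Int) []
        = List.replicate w 0 := by
      rw [PySem.List.pyGetD_natCast]
      rw [List.getD_eq_getElem?_getD, List.getElem?_append_right (by omega)]
      simp only [hAlen, Nat.sub_self]
      have : 0 < M.length - k := by omega
      simp [List.getElem?_replicate, this]
    simp only [List.foldl_cons, List.foldl_nil, hget]
    rw [PySem.List.pySetD_natCast]
    rw [List.set_append_right _ _ (by omega)]
    have hrep : List.replicate (M.length - k) (List.replicate w (0:Int))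
        = List.replicate w 0 :: List.replicate (M.length - (k+1)) (List.replicate w 0) := by
      have : M.length - k = (M.length - (k+1)) + 1 := by omega
      rw [this, List.replicate_succ]
    rw [hrep]
    simp only [hAlen, Nat.sub_self, List.set_cons_zero]
    rw [List.range_succ, List.map_append]
    simp [hA]

lemma pv_hp_eq (M : List (List Int)) :
    horizontalProjection M
      = (List.range M.length).map
          (fun (i : Nat) => (pvInner ((PySem.List.pyGetD M 0 []).length : Int)
            (PySem.List.pyGetD M (i : Int) [])
            (List.replicate (PySem.List.pyGetD M 0 []).length 0)).1) := by
  have hz : (PySem.List.pyRange 0 ((PySem.List.pyGetD M 0 []).length : Int) 1).map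
      (fun _ => (0 : Int)) = List.replicate (PySem.List.pyGetD M 0 []).length 0 := by
    rw [pv_map_constv]
    congr 1
    simp [PySem.List.length_pyRange_one]
  have hinit : (PySem.List.pyRange 0 (M.length : Int) 1).foldl
      (fun acc _ => acc ++ [List.replicate (PySem.List.pyGetD M 0 []).length (0:Int)]) []
      = List.replicate M.length (List.replicate (PySem.List.pyGetD M 0 []).length 0) := by
    rw [PySem.List.foldl_append_singleton_eq_map, List.nil_append, pv_map_constv]
    congr 1
    simp [PySem.List.length_pyRange_one]
  have hmain := pv_proj_fold M (PySem.List.pyGetD M 0 []).length M.length (le_refl _)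
  simp only [pvInner] at hmain
  simp only [horizontalProjection, hz, hinit, pvInner]
  simpa using hmain

lemma pv_A_as_fold (M : List (List Int)) :
    lineSlice M =
      (let st := M.foldl (pvStep ((PySem.List.pyGetD M 0 []).length : Int)) ([], [])
       if st.2 ≠ [] then st.1 ++ [st.2] else st.1) := by
  simp only [lineSlice]
  rw [pv_hp_eq]
  have hlen : (((List.range M.length).map
      (fun (i : Nat) => (pvInner ((PySem.List.pyGetD M 0 []).length : Int)
        (PySem.List.pyGetD M (i : Int) [])
        (List.replicate (PySem.List.pyGetD M 0 []).length 0)).1)).length : Int)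
      = (M.length : Int) := by simp
  rw [hlen]
  have hcongr : ∀ (st : List (List (List Int)) × List (List Int)) (i : Int),
      i ∈ PySem.List.pyRange 0 (M.length : Int) 1 →
      (if PySem.List.pyGetD (PySem.List.pyGetD ((List.range M.length).map
            (fun (i : Nat) => (pvInner ((PySem.List.pyGetD M 0 []).length : Int)
              (PySem.List.pyGetD M (i : Int) [])
              (List.replicate (PySem.List.pyGetD M 0 []).length 0)).1)) i []) 0 0 == 1
       then (st.1, st.2 ++ [PySem.List.pyGetD M i []])
       else if PySem.List.pyGetD (PySem.List.pyGetD ((List.range M.length).map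
            (fun (i : Nat) => (pvInner ((PySem.List.pyGetD M 0 []).length : Int)
              (PySem.List.pyGetD M (i : Int) [])
              (List.replicate (PySem.List.pyGetD M 0 []).length 0)).1)) i []) 0 0 == 0
              ∧ st.2 ≠ []
       then (st.1 ++ [st.2], []) else st)
      = pvStep ((PySem.List.pyGetD M 0 []).length : Int) st (PySem.List.pyGetD M i []) := by
    intro st i hi
    rw [PySem.List.mem_pyRange_one] at hi
    have hnat : i = ((i.toNat : Nat) : Int) := by omega
    have hint : i.toNat < M.length := by omega
    have hrow : PySem.List.pyGetD ((List.range M.length).map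
        (fun (i : Nat) => (pvInner ((PySem.List.pyGetD M 0 []).length : Int)
          (PySem.List.pyGetD M (i : Int) [])
          (List.replicate (PySem.List.pyGetD M 0 []).length 0)).1)) i []
        = (pvInner ((PySem.List.pyGetD M 0 []).length : Int)
            (PySem.List.pyGetD M i [])
            (List.replicate (PySem.List.pyGetD M 0 []).length 0)).1 := by
      rw [hnat, PySem.List.pyGetD_natCast, PySem.List.getD_map_range _ _ _ _ hint]
    rw [hrow, pv_hp_head]
    by_cases hb : pvBlack ((PySem.List.pyGetD M 0 []).length : Int) (PySem.List.pyGetD M i [])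
    · simp [hb, pvStep]
    · simp [hb, pvStep]
  rw [PySem.List.foldl_congr_mem (PySem.List.pyRange 0 (M.length : Int) 1) _
    (fun st i => pvStep ((PySem.List.pyGetD M 0 []).length : Int) st
      (PySem.List.pyGetD M i [])) ([], [])
    (fun st i hi => hcongr st i hi)]
  rw [PySem.List.foldl_pyRange_zero_pyGetD']

lemma pv_fold_aux (p : List Int → Bool) (cM : Int) (hp : p = pvBlack cM)
    (rows : List (List Int)) :
    ∀ lines pxl,
      (let st := rows.foldl (pvStep cM) (lines, pxl)
       if st.2 ≠ [] then st.1 ++ [st.2] else st.1) = lines ++ pvAux p pxl rows := by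
  induction rows with
  | nil =>
    intro lines pxl
    by_cases h : pxl = [] <;> simp [pvAux, h]
  | cons r rest ih =>
    intro lines pxl
    simp only [List.foldl_cons]
    by_cases hb : p r
    · have : pvStep cM (lines, pxl) r = (lines, pxl ++ [r]) := by
        simp [pvStep, ← hp, hb]
      rw [this, ih]
      simp [pvAux, hb]
    · by_cases hpxl : pxl = []
      · have : pvStep cM (lines, pxl) r = (lines, pxl) := by
          simp [pvStep, ← hp, hb, hpxl]
        rw [this, ih]
        simp [pvAux, hb, hpxl]
      · have : pvStep cM (lines, pxl) r = (lines ++ [pxl], []) := by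
          simp [pvStep, ← hp, hb, hpxl]
        rw [this, ih]
        simp [pvAux, hb, hpxl]

lemma pv_aux_slices (p : List Int → Bool) :
    ∀ (n : Nat) (rows : List (List Int)), rows.length ≤ n →
      pvAux p [] rows = pvSlices p rows ∧
      ∀ pxl, pxl ≠ [] →
        pvAux p pxl rows
          = (pxl ++ (pvSpan p rows).1) :: pvSlices p (pvSpan p rows).2 := by
  intro n
  induction n with
  | zero =>
    intro rows hlen
    have : rows = [] := by
      cases rows with
      | nil => rfl
      | cons r rest => simp at hlen
    subst this
    refine ⟨by simp [pvAux, pvSlices], ?_⟩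
    intro pxl hpxl
    simp [pvAux, pvSpan, pvSlices, hpxl]
  | succ n ih =>
    intro rows hlen
    cases rows with
    | nil =>
      refine ⟨by simp [pvAux, pvSlices], ?_⟩
      intro pxl hpxl
      simp [pvAux, pvSpan, pvSlices, hpxl]
    | cons r rest =>
      have hrest : rest.length ≤ n := by simpa using hlen
      constructor
      · by_cases hb : p r
        · have h2 := (ih rest hrest).2 [r] (by simp)
          simp only [pvAux, hb, if_true, List.nil_append]
          rw [h2]
          simp [pvSlices, pvSpan, hb]
        · simp [pvAux, hb, (ih rest hrest).1, pvSlices, hb]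
      · intro pxl hpxl
        by_cases hb : p r
        · have h2 := (ih rest hrest).2 (pxl ++ [r]) (by simp)
          simp only [pvAux, hb, if_true]
          rw [h2]
          simp [pvSlices, pvSpan, hb]
        · simp only [pvAux, hb, if_false, hpxl, if_neg hpxl]
          rw [(ih rest hrest).1]
          simp [pvSpan, hb, pvSlices, hpxl]

-- ===== VERDICT (by name: the statement is the Claim_ definition above) =====
theorem lineSlice_spec : Claim_equal_lineSlice := by
  intro M _hdom _hpre
  unfold Spec_lineSlice
  rw [pv_A_as_fold M]
  have h := pv_fold_aux (pvBlack ((PySem.List.pyGetD M 0 []).length : Int)) _ rfl M [] []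
  simp only [h, List.nil_append]
  have h2 := (pv_aux_slices (pvBlack ((PySem.List.pyGetD M 0 []).length : Int))
    M.length M (le_refl _)).1
  rw [h2]
  rfl
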